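-- pv_equiv track=rewrite | github.com/ZerghamAhmed/TheoryCoder | predicates.py | pushable_word_down
-- ===== SOURCE A (Python) =====
-- def pushable_word_down(state, word):
--     """
--     Check if the word can be pushed downwards.
--
--     Args:
--     state (dict): The current game state.
--     word (str): The word entity to check.
--
--     Returns:
--     bool: True if the word is pushable downwards, False otherwise.
--     """
--     for (x, y) in state.get(word, []):
--         obj_pos = [x, y - 1]      # Position where baba_obj needs to be to push down
--         target_pos = [x, y + 1]   # Position where the word will be pushed to
--
--         if target_pos not in state.get('empty', []):
--             return False
--         if obj_pos not in state.get('empty', []):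
--             return False
--     return True
-- ===== SOURCE B (Python) =====
-- def pushable_word_down(state, word):
--     required = sorted((x, y + d) for (x, y) in state.get(word, []) for d in (-1, 1))
--     empties = sorted((e[0], e[1]) for e in state.get('empty', []) if len(e) == 2)
--     i = 0
--     n = len(empties)
--     for r in required:
--         while i < n and empties[i] < r:
--             i += 1
--         if i == n or empties[i] != r:
--             return False
--     return True
-- ===== Notes on version B (the rewrite author's own statement) =====
-- stated objective: alternative
-- what changed: Replaces A's per-cell loop with repeated linear membership scans of the 'empty' list by a sort-then-merge algorithm: the required-empty neighbour positions and the empty cells are each sorted once and a single two-pointer merge pass decides whether every required position occurs among the empties. Pre_ excludes states whose word list contains a non-pair cell, on which A may still return False by stopping at an earlier failing cell while B's comprehension unpacks every cell and raises.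
-- outside the precondition, e.g. on pushable_word_down({'empty': [[45, 174], [14, 1, 2]]}, 'empty'): A returns False, B raises ValueError
import Mathlib
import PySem

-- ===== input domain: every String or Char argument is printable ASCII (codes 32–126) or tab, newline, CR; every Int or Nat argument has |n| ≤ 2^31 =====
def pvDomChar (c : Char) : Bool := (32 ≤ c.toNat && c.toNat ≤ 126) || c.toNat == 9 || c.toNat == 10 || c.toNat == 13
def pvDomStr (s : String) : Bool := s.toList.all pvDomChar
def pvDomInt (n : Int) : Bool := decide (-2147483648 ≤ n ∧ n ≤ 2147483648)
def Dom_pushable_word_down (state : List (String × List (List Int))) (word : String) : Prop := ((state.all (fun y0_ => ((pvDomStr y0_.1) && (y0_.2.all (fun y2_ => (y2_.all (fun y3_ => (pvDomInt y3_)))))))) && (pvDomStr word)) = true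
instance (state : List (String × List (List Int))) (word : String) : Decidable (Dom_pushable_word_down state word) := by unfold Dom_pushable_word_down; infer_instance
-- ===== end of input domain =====

-- B replaces A's nested membership scans by a sort-then-merge algorithm: both the
-- required-empty positions and the empty cells are sorted once and a single
-- two-pointer merge pass decides inclusion (objective: alternative).

-- ===== PORT A =====
-- the for-loop of A: returns False as soon as a cell's lower or upper neighbour
-- is not in 'empty'; cells that are not [x, y] pairs raise in Python (outside Pre_)
def pwdLoop (empties : List (List Int)) : List (List Int) → Bool
  | [] => true
  | c :: rest =>
    match c with
    | [x, y] =>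
      if !(empties.contains [x, y + 1]) then false
      else if !(empties.contains [x, y - 1]) then false
      else pwdLoop empties rest
    | _ => false

def pushable_word_down (state : List (String × List (List Int))) (word : String) : Bool :=
  pwdLoop (PySem.Dict.getD (PySem.Dict.mk state) "empty" [])
          (PySem.Dict.getD (PySem.Dict.mk state) word [])

-- ===== PORT B =====
-- Python's '<' on int pairs: lexicographic comparison, written out
def pvLexLt (p q : Int × Int) : Bool := decide (p.1 < q.1) || (p.1 == q.1 && decide (p.2 < q.2))

-- the two-pointer pass of Source B: the advancing index i over the sorted 'empties'
-- becomes consuming the head of the (sorted) empties list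
def pvMerge : List (Int × Int) → List (Int × Int) → Bool
  | [], _ => true
  | _ :: _, [] => false
  | r :: rs, e :: es =>
    if pvLexLt e r then pvMerge (r :: rs) es
    else if e == r then pvMerge rs (e :: es)
    else false
termination_by r e => r.length + e.length

def pushable_word_down_alt (state : List (String × List (List Int))) (word : String) : Bool :=
  let required : List (Int × Int) :=
    PySem.List.sorted2
      ((PySem.Dict.getD (PySem.Dict.mk state) word []).flatMap
        (fun c => match c with
          | [x, y] => [(x, y - 1), (x, y + 1)]
          | _ => []))
      Prod.fst Prod.snd
  let empties : List (Int × Int) :=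
    PySem.List.sorted2
      ((PySem.Dict.getD (PySem.Dict.mk state) "empty" []).filterMap
        (fun e => match e with
          | [a, b] => some (a, b)
          | _ => none))
      Prod.fst Prod.snd
  pvMerge required empties

-- ===== PRECONDITION & SPEC =====
-- Pre_ excludes inputs where some cell listed under `word` is not a 2-element list:
-- there Python raises ValueError while unpacking '(x, y)' (A may instead return False
-- by stopping at an earlier failing cell, but B's comprehension unpacks every cell and raises).
def Pre_pushable_word_down (state : List (String × List (List Int))) (word : String) : Prop :=
  ∀ c ∈ PySem.Dict.getD (PySem.Dict.mk state) word [], c.length = 2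
instance (state : List (String × List (List Int))) (word : String) : Decidable (Pre_pushable_word_down state word) := by unfold Pre_pushable_word_down; infer_instance

def pvWitness_pushable_word_down : (List (String × List (List Int))) × String :=
  ([("empty", [[0, 0], [0, 2]]), ("w", [[0, 1]])], "w")

def Spec_pushable_word_down (state : List (String × List (List Int))) (word : String) (out : Bool) : Prop := out = pushable_word_down_alt state word
instance (state : List (String × List (List Int))) (word : String) (out : Bool) : Decidable (Spec_pushable_word_down state word out) := by unfold Spec_pushable_word_down; infer_instance

-- ===== CLAIM (what is proved, stated in full; the proofs are below) =====
def Claim_equal_pushable_word_down : Prop := ∀ (state : List (String × List (List Int))) (word : String), Dom_pushable_word_down state word → Pre_pushable_word_down state word → Spec_pushable_word_down state word (pushable_word_down state word)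

-- ===== LEMMAS AND PROOFS =====

-- `all` only looks at membership
theorem all_congr_mem {α : Type} (l : List α) (f g : α → Bool)
    (h : ∀ x ∈ l, f x = g x) : l.all f = l.all g := by
  induction l with
  | nil => rfl
  | cons a t ih =>
    simp only [List.all_cons, h a (List.mem_cons_self ..),
      ih (fun x hx => h x (List.mem_cons_of_mem _ hx))]

theorem all_perm {α : Type} {l₁ l₂ : List α} (h : l₁.Perm l₂) (f : α → Bool) :
    l₁.all f = l₂.all f := by
  rcases hb : l₂.all f with _ | _
  · simp only [List.all_eq_false] at hb ⊢
    obtain ⟨x, hx, hfx⟩ := hb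
    exact ⟨x, h.mem_iff.mpr hx, hfx⟩
  · simp only [List.all_eq_true] at hb ⊢
    exact fun x hx => hb x (h.mem_iff.mp hx)

theorem contains_perm {α : Type} [BEq α] [LawfulBEq α] {l₁ l₂ : List α}
    (h : l₁.Perm l₂) (x : α) : l₁.contains x = l₂.contains x := by
  rcases hb : l₂.contains x with _ | _ <;>
    simp only [List.contains_eq_mem, decide_eq_true_eq, decide_eq_false_iff_not] at hb ⊢ <;>
    simp [h.mem_iff, hb]

-- a length-2 list under A's membership test corresponds to its pair under B's
theorem contains_pairs (es : List (List Int)) (a b : Int) :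
    es.contains [a, b] =
      (es.filterMap (fun e => match e with
        | [c, d] => some ((c : Int), (d : Int))
        | _ => none)).contains (a, b) := by
  induction es with
  | nil => rfl
  | cons e t ih =>
    match e with
    | [] => simpa using ih
    | [c] => simpa using ih
    | [c, d] =>
      simp only [List.filterMap_cons]
      by_cases h : c = a ∧ d = b
      · simp [h.1, h.2]
      · have hl : ([a, b] == [c, d]) = ((a, b) == ((c : Int), (d : Int))) := by
          by_cases hx : a = c <;> by_cases hy : b = d <;>
            simp [hx, hy] <;> rfl
        simp only [List.contains_cons, ih, hl]
    | c :: d :: f :: t' => simpa using ih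

-- the for-loop of A, under Pre_, is an `all` over the required positions (in pair form)
theorem pwdLoop_eq (empties : List (List Int)) (cells : List (List Int))
    (h : ∀ c ∈ cells, c.length = 2) :
    pwdLoop empties cells =
      (cells.flatMap (fun c => match c with
          | [x, y] => [((x : Int), y - 1), (x, y + 1)]
          | _ => [])).all (fun p => empties.contains [p.1, p.2]) := by
  induction cells with
  | nil => simp [pwdLoop]
  | cons c rest ih =>
    have hc : c.length = 2 := h c (List.mem_cons_self ..)
    match c, hc with
    | [x, y], _ =>
      have ih' := ih (fun d hd => h d (List.mem_cons_of_mem _ hd))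
      simp only [pwdLoop, List.flatMap_cons, List.all_append, List.all_cons, List.all_nil, ih']
      by_cases h1 : empties.contains [x, y + 1] = true <;>
        by_cases h2 : empties.contains [x, y - 1] = true <;>
          simp [h1, h2, Bool.and_comm, Bool.and_left_comm, Bool.and_assoc]

-- basic facts about the lexicographic comparison
theorem pvLexLt_irrefl (a : Int × Int) : pvLexLt a a = false := by
  simp [pvLexLt]

theorem pvLexLt_total {a b : Int × Int} (h : pvLexLt a b = false) (hne : a ≠ b) :
    pvLexLt b a = true := by
  obtain ⟨a1, a2⟩ := a; obtain ⟨b1, b2⟩ := b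
  simp only [pvLexLt, Bool.or_eq_false_iff, Bool.and_eq_false_iff,
    decide_eq_false_iff_not, beq_eq_false_iff_ne, ne_eq] at h
  simp only [pvLexLt, Bool.or_eq_true, Bool.and_eq_true, decide_eq_true_eq, beq_iff_eq]
  have hne' : ¬ (a1 = b1 ∧ a2 = b2) := by
    intro ⟨h1, h2⟩; exact hne (by simp [h1, h2])
  rcases h with ⟨h1, h2⟩
  rcases h2 with h2 | h2 <;> omega

-- the sorting comparator used by sorted2 with fst/snd keys is exactly pvLexLt
theorem before_eq_pvLexLt (a b : Int × Int) :
    (decide (a.1 < b.1) || (!decide (b.1 < a.1) && decide (a.2 < b.2))) = pvLexLt a b := by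
  simp only [pvLexLt]
  by_cases h1 : a.1 < b.1 <;> by_cases h2 : b.1 < a.1 <;>
    by_cases h3 : a.2 < b.2 <;>
      simp [h1, h2, h3, show (a.1 == b.1) = decide (a.1 = b.1) from rfl] <;> omega

-- insertion keeps a list sorted (Pairwise "not strictly above")
theorem pairwise_insertBy {α : Type} (before : α → α → Bool)
    (hasym : ∀ a b, before a b = true → before b a = false)
    (htrans : ∀ a b c, before a b = true → before c b = false → before c a = false)
    (x : α) (acc : List α) (h : acc.Pairwise (fun a b => before b a = false)) :
    (PySem.List.insertBy before x acc).Pairwise (fun a b => before b a = false) := by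
  induction acc with
  | nil => simp [PySem.List.insertBy]
  | cons y ys ih =>
    rw [List.pairwise_cons] at h
    obtain ⟨hy, hys⟩ := h
    by_cases hb : before x y = true
    · simp only [PySem.List.insertBy, hb, if_true]
      refine List.Pairwise.cons ?_ (List.Pairwise.cons hy hys)
      intro z hz
      rcases List.mem_cons.mp hz with hzy | hz
      · subst hzy; exact hasym _ _ hb
      · exact htrans x y z hb (hy z hz)
    · simp only [PySem.List.insertBy, hb]
      refine List.Pairwise.cons ?_ (ih hys)
      intro z hz
      rcases (PySem.List.mem_insertBy before x z ys).mp hz with hz | hz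
      · subst hz; exact Bool.eq_false_iff.mpr hb
      · exact hy z hz

theorem pairwise_foldl_insertBy {α : Type} (before : α → α → Bool)
    (hasym : ∀ a b, before a b = true → before b a = false)
    (htrans : ∀ a b c, before a b = true → before c b = false → before c a = false)
    (xs : List α) (acc : List α) (h : acc.Pairwise (fun a b => before b a = false)) :
    (xs.foldl (fun acc x => PySem.List.insertBy before x acc) acc).Pairwise
      (fun a b => before b a = false) := by
  induction xs generalizing acc with
  | nil => exact h
  | cons x t ih =>
    exact ih _ (pairwise_insertBy before hasym htrans x acc h)

theorem sorted2_pairwise (xs : List (Int × Int)) :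
    (PySem.List.sorted2 xs Prod.fst Prod.snd).Pairwise (fun a b => pvLexLt b a = false) := by
  have hb : (fun (a b : Int × Int) => decide (a.1 < b.1) || (!decide (b.1 < a.1) && decide (a.2 < b.2))) = pvLexLt := by
    funext a b; exact before_eq_pvLexLt a b
  have h : PySem.List.sorted2 xs Prod.fst Prod.snd =
      xs.foldl (fun acc x => PySem.List.insertBy pvLexLt x acc) [] := by
    simp only [PySem.List.sorted2]
    simp only [hb]
    rfl
  rw [h]
  refine pairwise_foldl_insertBy pvLexLt ?_ ?_ xs [] (List.Pairwise.nil)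
  · intro a b hab
    by_contra hba
    have hba' : pvLexLt b a = true := Bool.not_eq_false _ |>.mp hba
    obtain ⟨a1, a2⟩ := a; obtain ⟨b1, b2⟩ := b
    simp only [pvLexLt, Bool.or_eq_true, Bool.and_eq_true, decide_eq_true_eq,
      beq_iff_eq] at hab hba'
    omega
  · intro a b c hab hcb
    by_contra hca
    have hca' : pvLexLt c a = true := Bool.not_eq_false _ |>.mp hca
    obtain ⟨a1, a2⟩ := a; obtain ⟨b1, b2⟩ := b; obtain ⟨c1, c2⟩ := c
    simp only [pvLexLt, Bool.or_eq_true, Bool.and_eq_true, Bool.or_eq_false_iff,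
      Bool.and_eq_false_iff, decide_eq_true_eq, decide_eq_false_iff_not,
      beq_iff_eq, beq_eq_false_iff_ne, ne_eq] at hab hcb hca'
    rcases hcb with ⟨h1, h2⟩ <;> rcases h2 with h2 | h2 <;> omega

-- correctness of the merge pass on sorted inputs
theorem pvMerge_eq (r e : List (Int × Int))
    (hr : r.Pairwise (fun a b => pvLexLt b a = false))
    (he : e.Pairwise (fun a b => pvLexLt b a = false)) :
    pvMerge r e = r.all (fun p => e.contains p) := by
  fun_induction pvMerge r e with
  | case1 e => simp
  | case2 r rs => simp
  | case3 r rs e es hlt ih =>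
    rw [List.pairwise_cons] at hr he
    obtain ⟨hrhd, hrtl⟩ := hr
    obtain ⟨-, hetl⟩ := he
    rw [ih (List.Pairwise.cons hrhd hrtl) hetl]
    refine all_congr_mem _ _ _ ?_
    intro p hp
    have hple : pvLexLt p r = false := by
      rcases List.mem_cons.mp hp with hpr | hp
      · subst hpr; exact pvLexLt_irrefl p
      · exact hrhd p hp
    have hpe : ¬ (p == e) = true := by
      intro hb
      have : p = e := eq_of_beq hb
      subst this
      rw [hple] at hlt; exact Bool.false_ne_true hlt
    simp only [List.contains_cons]
    simp [Bool.eq_false_iff.mpr hpe]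
  | case4 r rs e es hlt heq ih =>
    rw [List.pairwise_cons] at hr
    obtain ⟨-, hrtl⟩ := hr
    have her : e = r := eq_of_beq heq
    rw [ih hrtl he]
    simp [List.all_cons, her.symm]
  | case5 r rs e es hlt heq =>
    have hne : e ≠ r := fun h => heq (by simp [h])
    have hrl : pvLexLt r e = true :=
      pvLexLt_total (Bool.eq_false_iff.mpr hlt) hne
    rw [List.pairwise_cons] at he
    obtain ⟨hehd, -⟩ := he
    have hcont : ((e :: es).contains r) = false := by
      simp only [List.contains_cons, Bool.or_eq_false_iff]
      constructor
      · apply Bool.eq_false_iff.mpr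
        intro hb
        exact hne (eq_of_beq hb).symm
      · simp only [List.contains_eq_mem, decide_eq_false_iff_not]
        intro hmem
        have := hehd r hmem
        rw [this] at hrl; exact Bool.false_ne_true hrl
    simp only [List.all_cons]
    rw [hcont]
    simp

-- ===== VERDICT (by name: the statement is the Claim_ definition above) =====
theorem pushable_word_down_spec : Claim_equal_pushable_word_down := by
  intro state word _ hpre
  unfold Spec_pushable_word_down pushable_word_down pushable_word_down_alt
  set cells := PySem.Dict.getD (PySem.Dict.mk state) word [] with hc
  set emp := PySem.Dict.getD (PySem.Dict.mk state) "empty" [] with he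
  set reqPairs := cells.flatMap (fun c => match c with
      | [x, y] => [((x : Int), y - 1), (x, y + 1)]
      | _ => []) with hreq
  set empPairs := emp.filterMap (fun e => match e with
      | [a, b] => some ((a : Int), (b : Int))
      | _ => none) with hemp
  rw [pwdLoop_eq emp cells hpre]
  rw [pvMerge_eq _ _ (sorted2_pairwise reqPairs) (sorted2_pairwise empPairs)]
  rw [all_perm (PySem.List.sorted2_perm reqPairs Prod.fst Prod.snd false) _]
  refine all_congr_mem _ _ _ ?_
  intro p _
  rw [contains_perm (PySem.List.sorted2_perm empPairs Prod.fst Prod.snd false) p]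
  obtain ⟨a, b⟩ := p
  exact contains_pairs emp a b
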